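-- pv_equiv track=rewrite | github.com/ap-swift/emias | emias_check/parser.py | _estimate_page
-- ===== SOURCE A (Python) =====
-- def _estimate_page(text: str, position: int, page_texts: list[str]) -> int | None:
--     """Примерно определить номер страницы по позиции в полном тексте."""
--     if not page_texts:
--         return None
--     offset = 0
--     for i, pt in enumerate(page_texts):
--         end = offset + len(pt)
--         if position < end:
--             return i + 1
--         offset = end + 1  # +1 for the joining newline
--     return len(page_texts)
-- ===== SOURCE B (Python) =====
-- def _estimate_page(text: str, position: int, page_texts: list[str]) -> int | None:
--     """Prefix table of cumulative page-end offsets + binary search."""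
--     if not page_texts:
--         return None
--     ends = []
--     off = 0
--     for pt in page_texts:
--         off += len(pt)
--         ends.append(off)
--         off += 1  # +1 for the joining newline
--     # hand-written bisect_right over the strictly increasing `ends`
--     lo, hi = 0, len(ends)
--     while lo < hi:
--         mid = (lo + hi) // 2
--         if position < ends[mid]:
--             hi = mid
--         else:
--             lo = mid + 1
--     return min(lo + 1, len(page_texts))
-- ===== Notes on version B (the rewrite author's own statement) =====
-- stated objective: alternative
-- what changed: Replaces the incremental early-return scan with building a strictly increasing prefix table of page-end offsets and locating the position by binary search (bisect_right), capping the result at the page count.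
import Mathlib
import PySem

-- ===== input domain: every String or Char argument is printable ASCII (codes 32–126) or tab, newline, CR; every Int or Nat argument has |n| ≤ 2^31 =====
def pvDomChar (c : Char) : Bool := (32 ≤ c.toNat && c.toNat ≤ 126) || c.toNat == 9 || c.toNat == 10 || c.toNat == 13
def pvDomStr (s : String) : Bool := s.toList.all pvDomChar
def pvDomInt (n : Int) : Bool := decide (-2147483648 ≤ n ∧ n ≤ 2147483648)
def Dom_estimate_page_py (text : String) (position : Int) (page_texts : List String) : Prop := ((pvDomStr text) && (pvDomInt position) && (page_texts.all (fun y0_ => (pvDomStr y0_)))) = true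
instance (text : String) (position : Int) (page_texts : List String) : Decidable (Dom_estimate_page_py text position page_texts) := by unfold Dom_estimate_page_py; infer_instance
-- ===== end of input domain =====

-- B replaces A's incremental early-return scan by a prefix table of page-end offsets
-- plus a binary search (bisect_right), capped at the page count (objective: alternative).

-- ===== PORT A =====
-- the for-loop of A as structural recursion over the same state (offset, i);
-- `none` encodes falling off the loop (the final `return len(page_texts)`)
def estA_loop (position : Int) (offset : Int) (i : Int) (pts : List String) : Option Int :=
  match pts with
  | [] => none
  | pt :: rest =>
    let e := offset + PySem.Str.len pt
    if position < e then some (i + 1) else estA_loop position (e + 1) (i + 1) rest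

def estimate_page_py (text : String) (position : Int) (page_texts : List String) : Option Int :=
  if page_texts = [] then none
  else
    match estA_loop position 0 0 page_texts with
    | some r => some r
    | none => some (page_texts.length : Int)

-- ===== PORT B =====
-- the building for-loop of Source B: off += len(pt); ends.append(off); off += 1
def buildEnds (off : Int) (pts : List String) : List Int :=
  match pts with
  | [] => []
  | pt :: rest => (off + PySem.Str.len pt) :: buildEnds (off + PySem.Str.len pt + 1) rest

-- Source B's hand-written bisect_right while-loop; mid = (lo+hi)//2 on Nats is exact,
-- ends[mid] is always in range (lo < hi ≤ len), ported as getD (exact on that range)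
def bsr (ends : List Int) (position : Int) (lo hi : Nat) : Nat :=
  if lo < hi then
    let mid := (lo + hi) / 2
    if position < ends.getD mid 0 then bsr ends position lo mid
    else bsr ends position (mid + 1) hi
  else lo
termination_by hi - lo
decreasing_by all_goals omega

def estimate_page_py_alt (text : String) (position : Int) (page_texts : List String) : Option Int :=
  if page_texts = [] then none
  else
    let ends := buildEnds 0 page_texts
    let lo := bsr ends position 0 ends.length
    some (min ((lo : Int) + 1) (page_texts.length : Int))

-- ===== PRECONDITION & SPEC =====
def Spec_estimate_page_py (text : String) (position : Int) (page_texts : List String) (out : Option Int) : Prop := out = estimate_page_py_alt text position page_texts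
instance (text : String) (position : Int) (page_texts : List String) (out : Option Int) : Decidable (Spec_estimate_page_py text position page_texts out) := by unfold Spec_estimate_page_py; infer_instance

-- ===== CLAIM (what is proved, stated in full; the proofs are below) =====
def Claim_equal_estimate_page_py : Prop := ∀ (text : String) (position : Int) (page_texts : List String), Dom_estimate_page_py text position page_texts → Spec_estimate_page_py text position page_texts (estimate_page_py text position page_texts)

-- ===== LEMMAS AND PROOFS =====

lemma buildEnds_length (off : Int) (pts : List String) :
    (buildEnds off pts).length = pts.length := by
  induction pts generalizing off with
  | nil => rfl
  | cons pt rest ih => simp [buildEnds, ih]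

lemma buildEnds_ge (off : Int) (pts : List String) (x : Int)
    (hx : x ∈ buildEnds off pts) : off ≤ x := by
  induction pts generalizing off with
  | nil => simp [buildEnds] at hx
  | cons pt rest ih =>
    have hlen : (0:Int) ≤ PySem.Str.len pt := by
      rw [PySem.Str.len_eq]; positivity
    simp only [buildEnds, List.mem_cons] at hx
    rcases hx with h | h
    · omega
    · have := ih (off + PySem.Str.len pt + 1) h
      omega

-- i < countP ↔ ends[i] ≤ position, for the strictly increasing prefix table
lemma cnt_iff (position : Int) (pts : List String) (off : Int) (i : Nat)
    (hi : i < (buildEnds off pts).length) :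
    ((buildEnds off pts)[i]'hi ≤ position ↔
      i < (buildEnds off pts).countP (fun e => decide (e ≤ position))) := by
  induction pts generalizing off i with
  | nil => simp [buildEnds] at hi
  | cons pt rest ih =>
    simp only [buildEnds] at hi ⊢
    rw [List.countP_cons]
    simp only [decide_eq_true_eq]
    by_cases hpos : off + PySem.Str.len pt ≤ position
    · rw [if_pos hpos]
      cases i with
      | zero =>
        rw [List.getElem_cons_zero]
        omega
      | succ j =>
        simp only [List.length_cons] at hi
        have hj : j < (buildEnds (off + PySem.Str.len pt + 1) rest).length := by omega
        have hih := ih (off + PySem.Str.len pt + 1) j hj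
        rw [List.getElem_cons_succ]
        omega
    · rw [if_neg hpos]
      have htail : (buildEnds (off + PySem.Str.len pt + 1) rest).countP
          (fun e => decide (e ≤ position)) = 0 := by
        rw [List.countP_eq_zero]
        intro x hx
        have := buildEnds_ge (off + PySem.Str.len pt + 1) rest x hx
        simp only [decide_eq_true_eq]
        omega
      rw [htail]
      cases i with
      | zero =>
        rw [List.getElem_cons_zero]
        omega
      | succ j =>
        simp only [List.length_cons] at hi
        have hj : j < (buildEnds (off + PySem.Str.len pt + 1) rest).length := by omega
        have hmem : (buildEnds (off + PySem.Str.len pt + 1) rest)[j]'hj ∈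
            buildEnds (off + PySem.Str.len pt + 1) rest := List.getElem_mem hj
        have := buildEnds_ge (off + PySem.Str.len pt + 1) rest _ hmem
        rw [List.getElem_cons_succ]
        omega

-- A's loop returns i + countP + 1 when the count is short of the page count, none otherwise
lemma estA_loop_eq (position : Int) (pts : List String) (off : Int) (i : Int) :
    estA_loop position off i pts =
      (if (buildEnds off pts).countP (fun e => decide (e ≤ position)) < pts.length
       then some (i + ((buildEnds off pts).countP (fun e => decide (e ≤ position)) : Int) + 1)
       else none) := by
  induction pts generalizing off i with
  | nil => simp [estA_loop, buildEnds]
  | cons pt rest ih =>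
    simp only [estA_loop, buildEnds]
    rw [List.countP_cons]
    simp only [decide_eq_true_eq]
    by_cases hpos : position < off + PySem.Str.len pt
    · have hne : ¬ (off + PySem.Str.len pt ≤ position) := by omega
      have htail : (buildEnds (off + PySem.Str.len pt + 1) rest).countP
          (fun e => decide (e ≤ position)) = 0 := by
        rw [List.countP_eq_zero]
        intro x hx
        have := buildEnds_ge (off + PySem.Str.len pt + 1) rest x hx
        simp only [decide_eq_true_eq]
        omega
      rw [if_pos hpos, htail, if_neg hne]
      simp
    · have hle : off + PySem.Str.len pt ≤ position := by omega
      rw [if_neg hpos, ih (off + PySem.Str.len pt + 1) (i + 1), if_pos hle]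
      simp only [List.length_cons]
      by_cases hc : (buildEnds (off + PySem.Str.len pt + 1) rest).countP
          (fun e => decide (e ≤ position)) < rest.length
      · rw [if_pos hc, if_pos (by omega)]
        congr 1
        push_cast
        ring
      · rw [if_neg hc, if_neg (by omega)]

-- the binary search converges to any c with the bisect_right characterisation
lemma bsr_eq (ends : List Int) (position : Int) (c : Nat)
    (hiff : ∀ i (hi : i < ends.length), (ends[i]'hi ≤ position ↔ i < c)) :
    ∀ k lo hi, hi - lo = k → lo ≤ hi → hi ≤ ends.length → lo ≤ c → c ≤ hi →
      bsr ends position lo hi = c := by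
  intro k
  induction k using Nat.strong_induction_on with
  | _ k ihk =>
    intro lo hi hk hlohi hhilen hloc hchi
    rw [bsr]
    by_cases h : lo < hi
    · rw [if_pos h]
      have hmid : (lo + hi) / 2 < ends.length := by omega
      have hget : ends.getD ((lo + hi) / 2) 0 = ends[(lo + hi) / 2]'hmid :=
        List.getD_eq_getElem ends 0 hmid
      have hm := hiff ((lo + hi) / 2) hmid
      by_cases hb : position < ends.getD ((lo + hi) / 2) 0
      · rw [if_pos hb]
        rw [hget] at hb
        have hcm : c ≤ (lo + hi) / 2 := by
          by_contra hcon
          have := hm.mpr (by omega)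
          omega
        exact ihk ((lo + hi) / 2 - lo) (by omega) lo ((lo + hi) / 2) rfl
          (by omega) (by omega) hloc hcm
      · rw [if_neg hb]
        rw [hget] at hb
        have hcm : (lo + hi) / 2 < c := hm.mp (by omega)
        exact ihk (hi - ((lo + hi) / 2 + 1)) (by omega) ((lo + hi) / 2 + 1) hi rfl
          (by omega) hhilen (by omega) hchi
    · rw [if_neg h]
      omega

-- ===== VERDICT (by name: the statement is the Claim_ definition above) =====
theorem estimate_page_py_spec : Claim_equal_estimate_page_py := by
  intro text position page_texts _
  unfold Spec_estimate_page_py estimate_page_py estimate_page_py_alt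
  by_cases hnil : page_texts = []
  · simp [hnil]
  · rw [if_neg hnil, if_neg hnil, estA_loop_eq]
    have hclen : (buildEnds 0 page_texts).countP (fun e => decide (e ≤ position)) ≤
        page_texts.length := by
      have := List.countP_le_length (p := fun e => decide (e ≤ position))
        (l := buildEnds 0 page_texts)
      rw [buildEnds_length] at this
      exact this
    have hbsr : bsr (buildEnds 0 page_texts) position 0 (buildEnds 0 page_texts).length =
        (buildEnds 0 page_texts).countP (fun e => decide (e ≤ position)) := by
      refine bsr_eq _ position _ (fun i hi => cnt_iff position page_texts 0 i hi)
        (buildEnds 0 page_texts).length 0 (buildEnds 0 page_texts).length rfl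
        (by omega) le_rfl (by omega) ?_
      rw [buildEnds_length]
      exact hclen
    simp only [hbsr]
    have hlen0 : page_texts.length ≠ 0 := by
      simpa [List.length_eq_zero_iff] using hnil
    by_cases hlt : (buildEnds 0 page_texts).countP (fun e => decide (e ≤ position)) <
        page_texts.length
    · rw [if_pos hlt]
      simp only [Option.some.injEq]
      omega
    · rw [if_neg hlt]
      simp only [Option.some.injEq]
      omega
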